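-- pv_equiv track=rewrite | github.com/6210qwe/leetcode_py | leetcode_solutions/by_id/q1859.py | min_characters_to_satisfy_conditions
-- ===== SOURCE A (Python) =====
-- def min_characters_to_satisfy_conditions(a: str, b: str) -> int:
--     """
--     函数式接口 - 计算满足三个条件之一所需的最少操作数
--     """
--     # 计算字符频率
--     count_a = [0] * 26
--     count_b = [0] * 26
--     for char in a:
--         count_a[ord(char) - ord('a')] += 1
--     for char in b:
--         count_b[ord(char) - ord('a')] += 1
--
--     # 计算前缀和
--     prefix_sum_a = [0] * 27
--     prefix_sum_b = [0] * 27
--     for i in range(26):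
--         prefix_sum_a[i + 1] = prefix_sum_a[i] + count_a[i]
--         prefix_sum_b[i + 1] = prefix_sum_b[i] + count_b[i]
--
--     # 计算满足条件 1 和条件 2 所需的操作数
--     min_ops = float('inf')
--     for i in range(25):
--         ops1 = prefix_sum_a[i + 1] + (prefix_sum_b[26] - prefix_sum_b[i + 1])
--         ops2 = prefix_sum_b[i + 1] + (prefix_sum_a[26] - prefix_sum_a[i + 1])
--         min_ops = min(min_ops, ops1, ops2)
--
--     # 计算满足条件 3 所需的操作数
--     for i in range(26):
--         ops3 = (prefix_sum_a[26] - count_a[i]) + (prefix_sum_b[26] - count_b[i])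
--         min_ops = min(min_ops, ops3)
--
--     return min_ops
-- ===== SOURCE B (Python) =====
-- def min_characters_to_satisfy_conditions(a: str, b: str) -> int:
--     count_a = [0] * 26
--     count_b = [0] * 26
--     for char in a:
--         count_a[ord(char) - ord('a')] += 1
--     for char in b:
--         count_b[ord(char) - ord('a')] += 1
--     total_a = sum(count_a)
--     total_b = sum(count_b)
--     best = None
--     for i in range(25):
--         a_le = sum(count_a[:i + 1])
--         b_le = sum(count_b[:i + 1])
--         cand = min(a_le + (total_b - b_le), b_le + (total_a - a_le))
--         if best is None or cand < best:
--             best = cand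
--     for i in range(26):
--         ops3 = (total_a - count_a[i]) + (total_b - count_b[i])
--         if ops3 < best:
--             best = ops3
--     return best
-- ===== Notes on version B (the rewrite author's own statement) =====
-- stated objective: alternative
-- what changed: B drops A's two prefix-sum arrays and the float('inf') sentinel: it recomputes the at-most-i bucket sums by a direct scan (sum of a slice) for each split point, takes totals as sums of the count arrays, and keeps a running best that starts as None.
import Mathlib
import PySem

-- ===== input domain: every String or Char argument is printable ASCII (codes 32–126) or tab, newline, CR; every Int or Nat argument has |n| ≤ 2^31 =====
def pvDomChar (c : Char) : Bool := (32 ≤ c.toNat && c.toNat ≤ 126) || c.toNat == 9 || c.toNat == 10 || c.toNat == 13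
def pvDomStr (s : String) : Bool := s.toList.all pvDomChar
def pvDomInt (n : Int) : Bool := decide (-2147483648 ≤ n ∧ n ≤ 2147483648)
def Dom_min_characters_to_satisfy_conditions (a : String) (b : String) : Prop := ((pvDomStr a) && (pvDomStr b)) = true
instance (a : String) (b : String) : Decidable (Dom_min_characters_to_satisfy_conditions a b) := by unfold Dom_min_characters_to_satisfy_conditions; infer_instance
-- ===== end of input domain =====

-- B replaces A's prefix-sum tables and float('inf') sentinel by direct per-split bucket-sum
-- scans and a None-started running best (objective: alternative decomposition, same cost).

-- ===== PORT A =====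
-- count_x[ord(char)-ord('a')] += 1: a read then a write at a possibly negative index,
-- exact via PySem.List.pyGetD/pySetD (Python raises IndexError out of range; outside Pre_).
def pvBump (xs : List Int) (i : Int) : List Int :=
  PySem.List.pySetD xs i (PySem.List.pyGetD xs i 0 + 1)

-- the character-frequency loop, identical in A and in B
def pvCount (s : List Char) : List Int :=
  s.foldl (fun cnt c => pvBump cnt ((c.toNat : Int) - 97)) (List.replicate 26 0)

def min_characters_to_satisfy_conditions (a : String) (b : String) : Int :=
  let ca := pvCount a.toList
  let cb := pvCount b.toList
  -- prefix_sum loop (one Python loop fills both arrays, so the fold state is the pair);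
  -- indices i and i+1 are nonnegative and in range, so getD/set are exact here
  let ps := (List.range 26).foldl
    (fun (p : List Int × List Int) i =>
      (p.1.set (i + 1) (p.1.getD i 0 + ca.getD i 0),
       p.2.set (i + 1) (p.2.getD i 0 + cb.getD i 0)))
    (List.replicate 27 0, List.replicate 27 0)
  -- min_ops = float('inf') is modeled as none: the ops are ints, always < inf, so
  -- Python's min(inf, ops1, ops2) is min(ops1, ops2)
  let m1 := (List.range 25).foldl
    (fun (m : Option Int) i =>
      let ops1 := ps.1.getD (i + 1) 0 + (ps.2.getD 26 0 - ps.2.getD (i + 1) 0)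
      let ops2 := ps.2.getD (i + 1) 0 + (ps.1.getD 26 0 - ps.1.getD (i + 1) 0)
      some (match m with | none => min ops1 ops2 | some v => min (min v ops1) ops2))
    none
  let m2 := (List.range 26).foldl
    (fun (m : Option Int) i =>
      let ops3 := (ps.1.getD 26 0 - ca.getD i 0) + (ps.2.getD 26 0 - cb.getD i 0)
      some (match m with | none => ops3 | some v => min v ops3))
    m1
  m2.getD 0  -- m2 is always some (both loops are nonempty); the default 0 is never used

-- ===== PORT B =====
def min_characters_to_satisfy_conditions_alt (a : String) (b : String) : Int :=
  let ca := pvCount a.toList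
  let cb := pvCount b.toList
  let totalA := ca.sum
  let totalB := cb.sum
  let best1 := (List.range 25).foldl
    (fun (best : Option Int) i =>
      let aLe := (ca.take (i + 1)).sum   -- sum(count_a[:i+1]); the slice [:i+1] is take (i+1)
      let bLe := (cb.take (i + 1)).sum
      let cand := min (aLe + (totalB - bLe)) (bLe + (totalA - aLe))
      match best with
      | none => some cand
      | some v => if cand < v then some cand else some v)
    none
  let best2 := (List.range 26).foldl
    (fun (best : Option Int) i =>
      let ops3 := (totalA - ca.getD i 0) + (totalB - cb.getD i 0)
      match best with
      | some v => if ops3 < v then some ops3 else some v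
      | none => none)   -- unreachable: best1 is some after the 25-iteration loop
    best1
  match best2 with
  | some v => v
  | none => 0   -- unreachable

-- ===== PRECONDITION & SPEC =====
-- Pre_ excludes exactly the inputs where Python A raises IndexError: a character below 'G'
-- (code 71; ord(c)-97 < -26 falls outside the 26-list even with negative wraparound) or
-- above 'z'. B indexes the count arrays the same way, so B raises on exactly those inputs too.
def Pre_min_characters_to_satisfy_conditions (a : String) (b : String) : Prop :=
  ((a.toList ++ b.toList).all (fun c => 71 ≤ c.toNat && c.toNat ≤ 122)) = true
instance (a : String) (b : String) : Decidable (Pre_min_characters_to_satisfy_conditions a b) := by unfold Pre_min_characters_to_satisfy_conditions; infer_instance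
def pvWitness_min_characters_to_satisfy_conditions : String × String := ("aba", "caa")
def Spec_min_characters_to_satisfy_conditions (a : String) (b : String) (out : Int) : Prop := out = min_characters_to_satisfy_conditions_alt a b
instance (a : String) (b : String) (out : Int) : Decidable (Spec_min_characters_to_satisfy_conditions a b out) := by unfold Spec_min_characters_to_satisfy_conditions; infer_instance

-- ===== CLAIM (what is proved, stated in full; the proofs are below) =====
def Claim_equal_min_characters_to_satisfy_conditions : Prop := ∀ (a : String) (b : String), Dom_min_characters_to_satisfy_conditions a b → Pre_min_characters_to_satisfy_conditions a b → Spec_min_characters_to_satisfy_conditions a b (min_characters_to_satisfy_conditions a b)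

-- ===== LEMMAS AND PROOFS =====

lemma pvBump_length (xs : List Int) (i : Int) : (pvBump xs i).length = xs.length := by
  simp [pvBump, PySem.List.length_pySetD]

lemma foldl_bump_length (s : List Char) : ∀ (init : List Int),
    (s.foldl (fun cnt c => pvBump cnt ((c.toNat : Int) - 97)) init).length = init.length := by
  induction s with
  | nil => intro init; rfl
  | cons c s ih => intro init; rw [List.foldl_cons, ih, pvBump_length]

lemma pvCount_length (s : List Char) : (pvCount s).length = 26 := by
  unfold pvCount; rw [foldl_bump_length, List.length_replicate]

-- A's single prefix-sum loop over the pair of arrays is the pair of single-array folds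
lemma pv_prefix_pair (ca cb : List Int) :
    (List.range 26).foldl
        (fun (p : List Int × List Int) i =>
          (p.1.set (i + 1) (p.1.getD i 0 + ca.getD i 0),
           p.2.set (i + 1) (p.2.getD i 0 + cb.getD i 0)))
        (List.replicate 27 0, List.replicate 27 0)
      = ((List.range 26).foldl (fun ps i => ps.set (i + 1) (ps.getD i 0 + ca.getD i 0))
          (List.replicate 27 0),
         (List.range 26).foldl (fun ps i => ps.set (i + 1) (ps.getD i 0 + cb.getD i 0))
          (List.replicate 27 0)) := by
  suffices h : ∀ (l : List Nat) (x y : List Int),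
      l.foldl
        (fun (p : List Int × List Int) i =>
          (p.1.set (i + 1) (p.1.getD i 0 + ca.getD i 0),
           p.2.set (i + 1) (p.2.getD i 0 + cb.getD i 0))) (x, y)
      = (l.foldl (fun ps i => ps.set (i + 1) (ps.getD i 0 + ca.getD i 0)) x,
         l.foldl (fun ps i => ps.set (i + 1) (ps.getD i 0 + cb.getD i 0)) y) from
    h (List.range 26) _ _
  intro l
  induction l with
  | nil => intro x y; rfl
  | cons i t ih => intro x y; simp only [List.foldl_cons]; exact ih _ _

-- a fold from a some state with a some-preserving step stays some
lemma pv_fold_some (g : Option Int → Nat → Option Int)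
    (hg : ∀ v i, ∃ u, g (some v) i = some u) (l : List Nat) :
    ∀ v, ∃ u, l.foldl g (some v) = some u := by
  induction l with
  | nil => intro v; exact ⟨v, rfl⟩
  | cons i t ih =>
    intro v
    simp only [List.foldl_cons]
    obtain ⟨u, hu⟩ := hg v i
    rw [hu]
    exact ih u

-- characterisation of A's prefix-sum array
lemma pv_prefix_spec (c : List Int) (hc : c.length = 26) :
    ∀ n, n ≤ 26 →
      ((List.range n).foldl (fun ps i => ps.set (i + 1) (ps.getD i 0 + c.getD i 0))
          (List.replicate 27 0)).length = 27 ∧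
      ∀ k : Nat,
        ((List.range n).foldl (fun ps i => ps.set (i + 1) (ps.getD i 0 + c.getD i 0))
            (List.replicate 27 0)).getD k 0 = if k ≤ n then (c.take k).sum else 0 := by
  intro n
  induction n with
  | zero =>
    intro _
    refine ⟨by simp, fun k => ?_⟩
    rw [List.range_zero, List.foldl_nil, List.getD_eq_getElem?_getD, List.getElem?_replicate]
    rcases k with _ | k
    · split_ifs <;> simp
    · split_ifs <;> first | omega | simp
  | succ n ih =>
    intro hn
    obtain ⟨hlen, hget⟩ := ih (by omega)
    rw [List.range_succ, List.foldl_append, List.foldl_cons, List.foldl_nil]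
    set G := List.foldl (fun ps i => ps.set (i + 1) (ps.getD i 0 + c.getD i 0))
      (List.replicate 27 0) (List.range n) with hG
    constructor
    · rw [List.length_set, hlen]
    · intro k
      by_cases hk : k = n + 1
      · subst hk
        have hlt : n + 1 < G.length := by rw [hlen]; omega
        have hGn : G.getD n 0 = (c.take n).sum := by rw [hget n, if_pos (le_refl n)]
        have h1 : (c.take (n + 1)).sum = (c.take n).sum + c.getD n 0 := by
          rw [List.sum_take_succ _ _ (show n < c.length by omega)]
          congr 1
          simp [List.getD_eq_getElem?_getD, List.getElem?_eq_getElem (show n < c.length by omega)]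
        rw [if_pos (le_refl (n + 1)), h1, ← hGn]
        simp [List.getD_eq_getElem?_getD, hlt]
      · have hne : n + 1 ≠ k := fun hh => hk hh.symm
        have h2 : (G.set (n + 1) (G.getD n 0 + c.getD n 0)).getD k 0 = G.getD k 0 := by
          simp [List.getD_eq_getElem?_getD, hne]
        rw [h2, hget k]
        by_cases h1 : k ≤ n
        · rw [if_pos h1, if_pos (by omega)]
        · rw [if_neg h1, if_neg (by omega)]

-- A's min(inf, …) running-minimum fold equals B's compare-and-replace fold once started
lemma pv_loop2_eq (f : Nat → Int) (l : List Nat) :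
    ∀ (v : Int),
      l.foldl (fun (m : Option Int) i =>
          some (match m with | none => f i | some w => min w (f i))) (some v)
      = l.foldl (fun (m : Option Int) i =>
          match m with
          | some w => if f i < w then some (f i) else some w
          | none => none) (some v) := by
  induction l with
  | nil => intro v; rfl
  | cons i t ih =>
    intro v
    simp only [List.foldl_cons]
    have hB : (if f i < v then some (f i) else some v) = some (min v (f i)) := by
      split_ifs with h <;> simp only [Option.some_inj] <;> omega
    show List.foldl _ (some (min v (f i))) t
        = List.foldl _ (if f i < v then some (f i) else some v) t
    rw [hB]
    exact ih _

-- the 25-iteration first loop of B always produces some value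
lemma pv_best1_isSome (g : Option Int → Nat → Option Int)
    (hg : ∀ m i, ∃ v, g m i = some v) :
    ∃ v, (List.range 25).foldl g none = some v := by
  rw [show (25 : Nat) = 24 + 1 from rfl, List.range_succ, List.foldl_append,
    List.foldl_cons, List.foldl_nil]
  exact hg _ _

-- the core equality, over arbitrary length-26 count arrays
lemma pv_core (ca cb : List Int) (hca : ca.length = 26) (hcb : cb.length = 26) :
    (let ps := (List.range 26).foldl
        (fun (p : List Int × List Int) i =>
          (p.1.set (i + 1) (p.1.getD i 0 + ca.getD i 0),
           p.2.set (i + 1) (p.2.getD i 0 + cb.getD i 0)))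
        (List.replicate 27 0, List.replicate 27 0)
     let m1 := (List.range 25).foldl
        (fun (m : Option Int) i =>
          some (match m with
            | none => min (ps.1.getD (i + 1) 0 + (ps.2.getD 26 0 - ps.2.getD (i + 1) 0))
                          (ps.2.getD (i + 1) 0 + (ps.1.getD 26 0 - ps.1.getD (i + 1) 0))
            | some v => min (min v (ps.1.getD (i + 1) 0 + (ps.2.getD 26 0 - ps.2.getD (i + 1) 0)))
                          (ps.2.getD (i + 1) 0 + (ps.1.getD 26 0 - ps.1.getD (i + 1) 0))))
        none
     ((List.range 26).foldl
        (fun (m : Option Int) i =>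
          some (match m with
            | none => (ps.1.getD 26 0 - ca.getD i 0) + (ps.2.getD 26 0 - cb.getD i 0)
            | some v => min v ((ps.1.getD 26 0 - ca.getD i 0) + (ps.2.getD 26 0 - cb.getD i 0))))
        m1).getD 0)
    = (let best1 := (List.range 25).foldl
        (fun (best : Option Int) i =>
          match best with
          | none => some (min ((ca.take (i + 1)).sum + (cb.sum - (cb.take (i + 1)).sum))
                              ((cb.take (i + 1)).sum + (ca.sum - (ca.take (i + 1)).sum)))
          | some v =>
            if min ((ca.take (i + 1)).sum + (cb.sum - (cb.take (i + 1)).sum))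
                   ((cb.take (i + 1)).sum + (ca.sum - (ca.take (i + 1)).sum)) < v
            then some (min ((ca.take (i + 1)).sum + (cb.sum - (cb.take (i + 1)).sum))
                           ((cb.take (i + 1)).sum + (ca.sum - (ca.take (i + 1)).sum)))
            else some v)
        none
       match (List.range 26).foldl
        (fun (best : Option Int) i =>
          match best with
          | some v => if (ca.sum - ca.getD i 0) + (cb.sum - cb.getD i 0) < v
                      then some ((ca.sum - ca.getD i 0) + (cb.sum - cb.getD i 0)) else some v
          | none => none)
        best1 with
       | some v => v
       | none => 0) := by
  dsimp only
  rw [pv_prefix_pair ca cb]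
  dsimp only
  obtain ⟨hlena, hgeta⟩ := pv_prefix_spec ca hca 26 (le_refl 26)
  obtain ⟨hlenb, hgetb⟩ := pv_prefix_spec cb hcb 26 (le_refl 26)
  have htca : ca.take 26 = ca := List.take_of_length_le (by omega)
  have htcb : cb.take 26 = cb := List.take_of_length_le (by omega)
  -- rewrite A's first loop into B's first loop
  have hl1 : (List.range 25).foldl
      (fun (m : Option Int) i =>
        some (match m with
          | none => min (((List.range 26).foldl (fun ps i => ps.set (i + 1) (ps.getD i 0 + ca.getD i 0)) (List.replicate 27 0)).getD (i + 1) 0 + (((List.range 26).foldl (fun ps i => ps.set (i + 1) (ps.getD i 0 + cb.getD i 0)) (List.replicate 27 0)).getD 26 0 - ((List.range 26).foldl (fun ps i => ps.set (i + 1) (ps.getD i 0 + cb.getD i 0)) (List.replicate 27 0)).getD (i + 1) 0))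
                        (((List.range 26).foldl (fun ps i => ps.set (i + 1) (ps.getD i 0 + cb.getD i 0)) (List.replicate 27 0)).getD (i + 1) 0 + (((List.range 26).foldl (fun ps i => ps.set (i + 1) (ps.getD i 0 + ca.getD i 0)) (List.replicate 27 0)).getD 26 0 - ((List.range 26).foldl (fun ps i => ps.set (i + 1) (ps.getD i 0 + ca.getD i 0)) (List.replicate 27 0)).getD (i + 1) 0))
          | some v => min (min v (((List.range 26).foldl (fun ps i => ps.set (i + 1) (ps.getD i 0 + ca.getD i 0)) (List.replicate 27 0)).getD (i + 1) 0 + (((List.range 26).foldl (fun ps i => ps.set (i + 1) (ps.getD i 0 + cb.getD i 0)) (List.replicate 27 0)).getD 26 0 - ((List.range 26).foldl (fun ps i => ps.set (i + 1) (ps.getD i 0 + cb.getD i 0)) (List.replicate 27 0)).getD (i + 1) 0)))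
                        (((List.range 26).foldl (fun ps i => ps.set (i + 1) (ps.getD i 0 + cb.getD i 0)) (List.replicate 27 0)).getD (i + 1) 0 + (((List.range 26).foldl (fun ps i => ps.set (i + 1) (ps.getD i 0 + ca.getD i 0)) (List.replicate 27 0)).getD 26 0 - ((List.range 26).foldl (fun ps i => ps.set (i + 1) (ps.getD i 0 + ca.getD i 0)) (List.replicate 27 0)).getD (i + 1) 0))))
      none
      = (List.range 25).foldl
      (fun (best : Option Int) i =>
        match best with
        | none => some (min ((ca.take (i + 1)).sum + (cb.sum - (cb.take (i + 1)).sum))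
                            ((cb.take (i + 1)).sum + (ca.sum - (ca.take (i + 1)).sum)))
        | some v =>
          if min ((ca.take (i + 1)).sum + (cb.sum - (cb.take (i + 1)).sum))
                 ((cb.take (i + 1)).sum + (ca.sum - (ca.take (i + 1)).sum)) < v
          then some (min ((ca.take (i + 1)).sum + (cb.sum - (cb.take (i + 1)).sum))
                         ((cb.take (i + 1)).sum + (ca.sum - (ca.take (i + 1)).sum)))
          else some v)
      none := by
    apply PySem.List.foldl_congr_mem
    intro acc i hi
    have hi25 : i < 25 := List.mem_range.mp hi
    have hi1 : i + 1 ≤ 26 := by omega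
    have h26 : (26 : Nat) ≤ 26 := le_refl 26
    simp only [hgeta, hgetb, if_pos hi1, if_pos h26, htca, htcb]
    rcases acc with _ | v
    · rfl
    · dsimp only
      split_ifs with h <;> simp only [Option.some_inj] <;> omega
  rw [hl1]
  -- the first loop produced some value
  obtain ⟨w, hw⟩ := pv_best1_isSome
    (fun (best : Option Int) i =>
      match best with
      | none => some (min ((ca.take (i + 1)).sum + (cb.sum - (cb.take (i + 1)).sum))
                          ((cb.take (i + 1)).sum + (ca.sum - (ca.take (i + 1)).sum)))
      | some v =>
        if min ((ca.take (i + 1)).sum + (cb.sum - (cb.take (i + 1)).sum))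
               ((cb.take (i + 1)).sum + (ca.sum - (ca.take (i + 1)).sum)) < v
        then some (min ((ca.take (i + 1)).sum + (cb.sum - (cb.take (i + 1)).sum))
                       ((cb.take (i + 1)).sum + (ca.sum - (ca.take (i + 1)).sum)))
        else some v)
    (by
      intro m i
      rcases m with _ | v
      · exact ⟨_, rfl⟩
      · dsimp only; split_ifs <;> exact ⟨_, rfl⟩)
  rw [hw]
  -- rewrite A's second loop body via the prefix facts, then use pv_loop2_eq
  have hl2 : (List.range 26).foldl
      (fun (m : Option Int) i =>
        some (match m with
          | none => (((List.range 26).foldl (fun ps i => ps.set (i + 1) (ps.getD i 0 + ca.getD i 0)) (List.replicate 27 0)).getD 26 0 - ca.getD i 0) + (((List.range 26).foldl (fun ps i => ps.set (i + 1) (ps.getD i 0 + cb.getD i 0)) (List.replicate 27 0)).getD 26 0 - cb.getD i 0)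
          | some v => min v ((((List.range 26).foldl (fun ps i => ps.set (i + 1) (ps.getD i 0 + ca.getD i 0)) (List.replicate 27 0)).getD 26 0 - ca.getD i 0) + (((List.range 26).foldl (fun ps i => ps.set (i + 1) (ps.getD i 0 + cb.getD i 0)) (List.replicate 27 0)).getD 26 0 - cb.getD i 0))))
      (some w)
      = (List.range 26).foldl
      (fun (m : Option Int) i =>
        some (match m with
          | none => (ca.sum - ca.getD i 0) + (cb.sum - cb.getD i 0)
          | some v => min v ((ca.sum - ca.getD i 0) + (cb.sum - cb.getD i 0))))
      (some w) := by
    apply PySem.List.foldl_congr_mem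
    intro acc i _
    have h26 : (26 : Nat) ≤ 26 := le_refl 26
    simp only [hgeta, hgetb, if_pos h26, htca, htcb]
  rw [hl2, pv_loop2_eq (fun i => (ca.sum - ca.getD i 0) + (cb.sum - cb.getD i 0))]
  obtain ⟨u, hu⟩ := pv_fold_some
    (fun (best : Option Int) i =>
      match best with
      | some v => if (ca.sum - ca.getD i 0) + (cb.sum - cb.getD i 0) < v
                  then some ((ca.sum - ca.getD i 0) + (cb.sum - cb.getD i 0)) else some v
      | none => none)
    (by intro v i; dsimp only; split_ifs <;> exact ⟨_, rfl⟩)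
    (List.range 26) w
  rw [hu]
  rfl

-- ===== VERDICT (by name: the statement is the Claim_ definition above) =====
theorem min_characters_to_satisfy_conditions_spec : Claim_equal_min_characters_to_satisfy_conditions := by
  intro a b _ _
  unfold Spec_min_characters_to_satisfy_conditions
  unfold min_characters_to_satisfy_conditions min_characters_to_satisfy_conditions_alt
  exact pv_core (pvCount a.toList) (pvCount b.toList)
    (pvCount_length a.toList) (pvCount_length b.toList)
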